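-- pv_equiv track=rewrite | github.com/punativaishnavi/RefactoringSystem | main.py | long_method
-- ===== SOURCE A (Python) =====
-- def long_method(content):
--     code_lines = content.split('\n')
--     braces = 0
--     functions = []
--     current_function = None
--     current_function_lines = 0
--
--     for line in code_lines:
--         line = line.strip()
--         if not line:
--             continue
--         for char in line:
--             if char == '{':
--                 braces += 1
--             elif char == '}':
--                 braces -= 1
--         if (line.startswith('int') or line.startswith('void') or line.startswith('bool') or line.startswith(
--                 'char') or line.startswith('wchar_t') or line.startswith('double') or line.startswith(
--             'float')) and (line.endswith(')') or line.endswith('{')):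
--             if current_function is not None:
--                 functions.append((current_function, current_function_lines))
--             current_function = line.split()[1].split('(')[0]
--             current_function_lines = 1
--         elif current_function is not None:
--             current_function_lines += 1
--
--     if current_function is not None:
--         functions.append((current_function, current_function_lines))
--
--     if braces == 0:
--         return functions
-- ===== SOURCE B (Python) =====
-- def _is_def(l):
--     return (l.startswith(('int', 'void', 'bool', 'char', 'wchar_t', 'double', 'float'))
--             and (l.endswith(')') or l.endswith('{')))
--
--
-- def long_method(content):
--     lines = [s for s in (raw.strip() for raw in content.split('\n')) if s]
--     starts = [i for i, l in enumerate(lines) if _is_def(l)]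
--     funcs = []
--     for k, i in enumerate(starts):
--         name = lines[i].split()[1].split('(')[0]
--         nxt = starts[k + 1] if k + 1 < len(starts) else len(lines)
--         funcs.append((name, nxt - i))
--     chars = [c for l in lines for c in l]
--     if chars.count('{') == chars.count('}'):
--         return funcs
-- ===== Notes on version B (the rewrite author's own statement) =====
-- stated objective: alternative
-- what changed: Replaces A's single running-accumulator pass (current function name + live line counter + flush-on-next-definition) by an index-gap decomposition: build the stripped non-empty line list once, collect the indices of definition lines, and compute each function's length as the gap to the next definition index; the brace balance is a separate count over the same lines.
import Mathlib
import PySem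

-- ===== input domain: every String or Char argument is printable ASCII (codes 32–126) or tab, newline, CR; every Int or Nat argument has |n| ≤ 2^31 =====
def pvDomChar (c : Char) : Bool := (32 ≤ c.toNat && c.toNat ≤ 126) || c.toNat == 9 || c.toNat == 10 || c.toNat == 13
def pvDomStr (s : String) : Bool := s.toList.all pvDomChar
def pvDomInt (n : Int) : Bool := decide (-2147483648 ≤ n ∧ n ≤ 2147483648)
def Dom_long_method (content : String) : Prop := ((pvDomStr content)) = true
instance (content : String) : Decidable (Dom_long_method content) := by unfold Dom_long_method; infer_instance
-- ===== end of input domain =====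

-- B replaces A's single running-accumulator pass by an index-gap computation over the
-- stripped non-empty lines (function lengths = gaps between definition-line indices);
-- objective: alternative decomposition, same asymptotic cost.

-- shared helpers (identical tests/extraction in both Pythons)
def pvIsDef (l : List Char) : Bool :=
  (PySem.Chars.startswith l "int".toList || PySem.Chars.startswith l "void".toList ||
   PySem.Chars.startswith l "bool".toList || PySem.Chars.startswith l "char".toList ||
   PySem.Chars.startswith l "wchar_t".toList || PySem.Chars.startswith l "double".toList ||
   PySem.Chars.startswith l "float".toList) &&
  (PySem.Chars.endswith l ")".toList || PySem.Chars.endswith l "{".toList)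

-- line.split()[1].split('(')[0]; the [1] index is pyGetD with default [] — Pre_ excludes
-- exactly the inputs where Python raises IndexError there
def pvName (l : List Char) : String :=
  String.mk ((PySem.Chars.splitOn (PySem.List.pyGetD (PySem.Chars.split₀ l) 1 []) ['(']).headD [])

-- ===== PORT A =====
def pvStepA (s : Int × List (String × Int) × Option String × Int) (raw : List Char) :
    Int × List (String × Int) × Option String × Int :=
  let line := PySem.Chars.strip raw
  if line = [] then s else
    match s with
    | (braces, functions, cur, cnt) =>
      let braces := line.foldl (fun b ch => if ch = '{' then b + 1 else if ch = '}' then b - 1 else b) braces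
      if pvIsDef line then
        match cur with
        | some n => (braces, functions ++ [(n, cnt)], some (pvName line), 1)
        | none   => (braces, functions, some (pvName line), 1)
      else
        match cur with
        | some n => (braces, functions, some n, cnt + 1)
        | none   => (braces, functions, none, cnt)

def long_method (content : String) : Option (List (String × Int)) :=
  match (PySem.Chars.splitOn content.toList ['\n']).foldl pvStepA (0, [], none, 0) with
  | (braces, functions, cur, cnt) =>
    let functions := match cur with
      | some n => functions ++ [(n, cnt)]
      | none   => functions
    if braces = 0 then some functions else none

-- ===== PORT B =====
def pvFiltered (content : String) : List (List Char) :=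
  ((PySem.Chars.splitOn content.toList ['\n']).map PySem.Chars.strip).filter (fun l => decide (l ≠ []))

def pvStarts (lines : List (List Char)) : List Int :=
  ((PySem.List.enumerate lines).filter (fun p => pvIsDef p.2)).map (fun p => p.1)

def pvGapFuncs (lines : List (List Char)) : List (String × Int) :=
  let starts := pvStarts lines
  (PySem.List.enumerate starts).map (fun p =>
    (pvName (PySem.List.pyGetD lines p.2 []),
     (if p.1 + 1 < (starts.length : Int) then PySem.List.pyGetD starts (p.1 + 1) 0
      else (lines.length : Int)) - p.2))

def long_method_alt (content : String) : Option (List (String × Int)) :=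
  let lines := pvFiltered content
  let funcs := pvGapFuncs lines
  let chars := lines.flatMap id
  if chars.count '{' = chars.count '}' then some funcs else none

-- ===== PRECONDITION & SPEC =====
-- Pre_ excludes exactly the inputs where the Python raises IndexError: a function-definition
-- line whose whitespace-split has fewer than 2 tokens (line.split()[1]); both A and B raise there.
def Pre_long_method (content : String) : Prop :=
  ∀ l ∈ pvFiltered content, pvIsDef l = true → 2 ≤ (PySem.Chars.split₀ l).length
instance (content : String) : Decidable (Pre_long_method content) := by
  unfold Pre_long_method; infer_instance

def pvWitness_long_method : String := "int main()\n{\n}"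

def Spec_long_method (content : String) (out : Option (List (String × Int))) : Prop := out = long_method_alt content
instance (content : String) (out : Option (List (String × Int))) : Decidable (Spec_long_method content out) := by unfold Spec_long_method; infer_instance

-- ===== CLAIM (what is proved, stated in full; the proofs are below) =====
def Claim_equal_long_method : Prop := ∀ (content : String), Dom_long_method content → Pre_long_method content → Spec_long_method content (long_method content)

-- ===== LEMMAS AND PROOFS =====

-- A's loop body on an already stripped, non-empty line
def pvCore (s : Int × List (String × Int) × Option String × Int) (line : List Char) :
    Int × List (String × Int) × Option String × Int :=
  match s with
  | (braces, functions, cur, cnt) =>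
    let braces := line.foldl (fun b ch => if ch = '{' then b + 1 else if ch = '}' then b - 1 else b) braces
    if pvIsDef line then
      match cur with
      | some n => (braces, functions ++ [(n, cnt)], some (pvName line), 1)
      | none   => (braces, functions, some (pvName line), 1)
    else
      match cur with
      | some n => (braces, functions, some n, cnt + 1)
      | none   => (braces, functions, none, cnt)

theorem stepA_eq (s : Int × List (String × Int) × Option String × Int) (raw : List Char) :
    pvStepA s raw = if PySem.Chars.strip raw = [] then s else pvCore s (PySem.Chars.strip raw) := by
  obtain ⟨b, fs, cur, cnt⟩ := s
  simp only [pvStepA, pvCore]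

theorem fold_filtered (raws : List (List Char)) (s : Int × List (String × Int) × Option String × Int) :
    raws.foldl pvStepA s =
      ((raws.map PySem.Chars.strip).filter (fun l => decide (l ≠ []))).foldl pvCore s := by
  induction raws generalizing s with
  | nil => rfl
  | cons r rs ih =>
    simp only [List.foldl_cons, List.map_cons, List.filter_cons, stepA_eq]
    by_cases h : PySem.Chars.strip r = [] <;> simp [h, ih]

theorem charfold (l : List Char) (b : Int) :
    l.foldl (fun b ch => if ch = '{' then b + 1 else if ch = '}' then b - 1 else b) b
      = b + (l.count '{' : Int) - (l.count '}' : Int) := by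
  induction l generalizing b with
  | nil => simp
  | cons c t ih =>
    by_cases h1 : c = '{'
    · subst h1; simp [ih]; ring
    · by_cases h2 : c = '}'
      · subst h2; simp [ih, h1]; ring
      · simp [ih, h1, h2]

theorem braces_fold (ls : List (List Char)) (b : Int) (fs : List (String × Int))
    (cur : Option String) (cnt : Int) :
    (ls.foldl pvCore (b, fs, cur, cnt)).1
      = b + ((ls.flatMap id).count '{' : Int) - ((ls.flatMap id).count '}' : Int) := by
  induction ls generalizing b fs cur cnt with
  | nil => simp
  | cons l t ih =>
    simp only [List.foldl_cons, pvCore, charfold]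
    cases hd : pvIsDef l <;> cases cur <;>
      simp [ih, List.count_append] <;> push_cast <;> ring

-- the (name, count) pairs A emits, as a structural recursion over the filtered lines
def pairsFrom : List (List Char) → Option (String × Int) → List (String × Int)
  | [], none => []
  | [], some nc => [nc]
  | l :: t, none =>
      if pvIsDef l then pairsFrom t (some (pvName l, 1)) else pairsFrom t none
  | l :: t, some (n, c) =>
      if pvIsDef l then (n, c) :: pairsFrom t (some (pvName l, 1))
      else pairsFrom t (some (n, c + 1))

def pvFlush (s : Int × List (String × Int) × Option String × Int) : List (String × Int) :=
  match s.2.2.1 with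
  | some n => s.2.1 ++ [(n, s.2.2.2)]
  | none   => s.2.1

theorem fold_funcs (ls : List (List Char)) (b : Int) (fs : List (String × Int))
    (cur : Option String) (cnt : Int) :
    pvFlush (ls.foldl pvCore (b, fs, cur, cnt))
      = fs ++ pairsFrom ls (cur.map (fun n => (n, cnt))) := by
  induction ls generalizing b fs cur cnt with
  | nil => cases cur <;> simp [pvFlush, pairsFrom]
  | cons l t ih =>
    simp only [List.foldl_cons, pvCore]
    cases hd : pvIsDef l <;> cases cur <;>
      simp [ih, pairsFrom, hd]

theorem pairsFrom_drop (ls : List (List Char)) :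
    pairsFrom (ls.drop (ls.findIdx pvIsDef)) none = pairsFrom ls none := by
  induction ls with
  | nil => rfl
  | cons l t ih =>
    by_cases h : pvIsDef l
    · simp [List.findIdx_cons, h]
    · simp [List.findIdx_cons, h, pairsFrom, ih]

theorem pairsFrom_some (ls : List (List Char)) (n : String) (c : Int) :
    pairsFrom ls (some (n, c))
      = (n, c + (ls.findIdx pvIsDef : Int)) :: pairsFrom (ls.drop (ls.findIdx pvIsDef)) none := by
  induction ls generalizing c with
  | nil => simp [pairsFrom]
  | cons l t ih =>
    by_cases h : pvIsDef l
    · simp [pairsFrom, List.findIdx_cons, h]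
    · simp only [pairsFrom, List.findIdx_cons, h, Bool.false_eq_true, ih,
        cond_false, List.drop_succ_cons]
      push_cast; ring_nf

theorem enumerate_shift' {α : Type} (xs : List α) (s d : Int) :
    PySem.List.enumerate xs (s + d) = (PySem.List.enumerate xs s).map (fun p => (p.1 + d, p.2)) := by
  induction xs generalizing s with
  | nil => simp [PySem.List.enumerate_nil]
  | cons x t ih =>
    rw [PySem.List.enumerate_cons, PySem.List.enumerate_cons, List.map_cons,
      show s + d + 1 = (s + 1) + d by ring, ih]

theorem enumerate_shift {α : Type} (xs : List α) :
    PySem.List.enumerate xs 1 = (PySem.List.enumerate xs 0).map (fun p => (p.1 + 1, p.2)) := by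
  rw [show (1:Int) = 0 + 1 by norm_num, enumerate_shift']; norm_num

theorem pvStarts_cons_pos (l : List Char) (t : List (List Char)) (h : pvIsDef l = true) :
    pvStarts (l :: t) = 0 :: (pvStarts t).map (fun i => i + 1) := by
  simp [pvStarts, PySem.List.enumerate_cons, h, zero_add, enumerate_shift,
    List.filter_map, List.map_map, Function.comp_def]

theorem pvStarts_cons_neg (l : List Char) (t : List (List Char)) (h : pvIsDef l = false) :
    pvStarts (l :: t) = (pvStarts t).map (fun i => i + 1) := by
  simp [pvStarts, PySem.List.enumerate_cons, h, zero_add, enumerate_shift,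
    List.filter_map, List.map_map, Function.comp_def]

theorem pvStarts_nonneg (ls : List (List Char)) : ∀ i ∈ pvStarts ls, 0 ≤ i := by
  intro i hi
  simp only [pvStarts, List.mem_map, List.mem_filter] at hi
  obtain ⟨p, ⟨hp, _⟩, rfl⟩ := hi
  rw [PySem.List.mem_enumerate_iff] at hp
  obtain ⟨k, hk, rfl⟩ := hp
  omega

theorem firstStart (ls : List (List Char)) :
    (pvStarts ls).headD (ls.length : Int) = (ls.findIdx pvIsDef : Int) := by
  induction ls with
  | nil => simp [pvStarts]
  | cons l t ih =>
    cases h : pvIsDef l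
    · rw [pvStarts_cons_neg l t h]
      rw [List.findIdx_cons, h]
      cases hm : pvStarts t with
      | nil => rw [hm] at ih; simp at ih ⊢; omega
      | cons a m => rw [hm] at ih; simp at ih ⊢; omega

    · rw [pvStarts_cons_pos l t h]
      simp [List.findIdx_cons, h]

theorem gap_cons_neg (l : List Char) (t : List (List Char)) (h : pvIsDef l = false) :
    pvGapFuncs (l :: t) = pvGapFuncs t := by
  simp only [pvGapFuncs, pvStarts_cons_neg l t h]
  apply List.ext_getElem
  · simp [PySem.List.length_enumerate]
  intro k h1 h2
  simp only [List.getElem_map, PySem.List.getElem_enumerate]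
  have hk : k < (pvStarts t).length := by
    simpa [PySem.List.length_enumerate] using h2
  have hnn : 0 ≤ (pvStarts t)[k] := pvStarts_nonneg t _ (List.getElem_mem _)
  obtain ⟨n, hn⟩ := Int.eq_ofNat_of_zero_le hnn
  simp only [hn, zero_add]
  simp only [Prod.mk.injEq]
  constructor
  · rw [show ((n:Int) + 1) = ((n+1 : Nat) : Int) by push_cast; ring,
      PySem.List.pyGetD_natCast, PySem.List.pyGetD_natCast, List.getD_cons_succ]
  · by_cases hin : (k:Int) + 1 < ((pvStarts t).length : Int)
    · rw [if_pos (by simpa using hin), if_pos (by simpa using hin)]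
      have hk1 : k + 1 < (pvStarts t).length := by exact_mod_cast hin
      rw [show ((k:Int) + 1) = ((k+1 : Nat) : Int) by push_cast; ring,
        PySem.List.pyGetD_natCast, PySem.List.pyGetD_natCast,
        List.getD_eq_getElem _ _ (by simpa using hk1), List.getD_eq_getElem _ _ hk1]
      simp
    · rw [if_neg (by simpa using hin), if_neg (by simpa using hin)]
      simp

theorem gap_cons_pos (l : List Char) (t : List (List Char)) (h : pvIsDef l = true) :
    pvGapFuncs (l :: t)
      = (pvName l, 1 + (t.findIdx pvIsDef : Int)) :: pvGapFuncs t := by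
  have hfs := firstStart t
  simp only [pvGapFuncs, pvStarts_cons_pos l t h]
  apply List.ext_getElem
  · simp [PySem.List.length_enumerate]
  intro k h1 h2
  match k with
  | 0 =>
    simp only [PySem.List.enumerate_cons, List.getElem_map, List.getElem_cons_zero]
    simp only [Prod.mk.injEq]
    constructor
    · rw [PySem.List.pyGetD_ofNat']; rfl
    · cases hm : pvStarts t with
      | nil =>
        rw [hm] at hfs; simp at hfs
        rw [if_neg (by simp [hm])]
        simp [← hfs]
        ring
      | cons a m' =>
        rw [hm] at hfs; simp at hfs
        rw [if_pos (by simp [hm])]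
        rw [show (0:Int) + 1 = ((1:Nat) : Int) by norm_num, PySem.List.pyGetD_natCast]
        simp [← hfs]
        ring
  | k + 1 =>
    have hk : k < (pvStarts t).length := by
      simpa [PySem.List.length_enumerate] using h2
    simp only [PySem.List.enumerate_cons, List.getElem_map, List.getElem_cons_succ,
      enumerate_shift, PySem.List.getElem_enumerate]
    have hnn : 0 ≤ (pvStarts t)[k] := pvStarts_nonneg t _ (List.getElem_mem _)
    obtain ⟨n, hn⟩ := Int.eq_ofNat_of_zero_le hnn
    simp only [List.getElem_map, hn, zero_add, PySem.List.getElem_enumerate]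
    simp only [Prod.mk.injEq]
    constructor
    · rw [show ((n:Int) + 1) = ((n+1 : Nat) : Int) by push_cast; ring,
        PySem.List.pyGetD_natCast, PySem.List.pyGetD_natCast, List.getD_cons_succ]
    · by_cases hin : (k:Int) + 1 < ((pvStarts t).length : Int)
      · rw [if_pos (by have := hin; simp only [List.length_cons, List.length_map]; push_cast; omega),
          if_pos (by simpa using hin)]
        have hk1 : k + 1 < (pvStarts t).length := by exact_mod_cast hin
        rw [show (1:Int) + (k:Int) + 1 = ((k+2 : Nat) : Int) by push_cast; ring,
          show ((k:Int) + 1) = ((k+1 : Nat) : Int) by push_cast; ring,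
          PySem.List.pyGetD_natCast, PySem.List.pyGetD_natCast,
          List.getD_cons_succ, List.getD_eq_getElem _ _ (by simpa using hk1),
          List.getD_eq_getElem _ _ hk1]
        simp
      · rw [if_neg (by have := hin; simp only [List.length_cons, List.length_map]; push_cast; omega),
          if_neg (by simpa using hin)]
        simp

theorem pairs_eq_gaps (ls : List (List Char)) : pairsFrom ls none = pvGapFuncs ls := by
  induction ls with
  | nil => rfl
  | cons l t ih =>
    cases h : pvIsDef l
    · rw [gap_cons_neg l t h]
      simp only [pairsFrom, h, Bool.false_eq_true, if_false]
      exact ih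
    · rw [gap_cons_pos l t h]
      simp only [pairsFrom, h, if_true]
      rw [pairsFrom_some, pairsFrom_drop, ih]

-- ===== VERDICT (by name: the statement is the Claim_ definition above) =====
theorem long_method_spec : Claim_equal_long_method := by
  intro content _ _
  unfold Spec_long_method
  unfold long_method long_method_alt
  rw [fold_filtered]
  have hb := braces_fold (pvFiltered content) 0 [] none 0
  have hf := fold_funcs (pvFiltered content) 0 [] none 0
  simp only [Option.map_none, List.nil_append] at hf
  rw [pairs_eq_gaps] at hf
  rw [show ((PySem.Chars.splitOn content.toList ['\n']).map PySem.Chars.strip).filter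
        (fun l => decide (l ≠ [])) = pvFiltered content from rfl]
  generalize hs : (pvFiltered content).foldl pvCore (0, [], none, 0) = s at hb hf
  obtain ⟨br, fs, cur, cnt⟩ := s
  simp only [pvFlush] at hf
  simp only at hb
  dsimp only
  rw [hf]
  split_ifs with h1 h2 <;> first | rfl | omega
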